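-- pv_equiv track=rewrite | github.com/BlueRainbows/Proj_b | code/functions.py | sorted_data
-- ===== SOURCE A (Python) =====
-- def sorted_data(list_val):
--     """Функция вытаскивает из списка дату операции,
--     определяет последний год совершенной операции и сортирует от самой последней в данном году,
--     до самой первой"""
--     list_age = []
--     list_month = []
--     list_of_data = list_val[2::7]
--     for i in list_of_data:
--         if i[:4] not in list_age:
--             list_age.append(i[:4])
--         max_age = max(list_age)
--         if i[:4] == max_age:
--             list_month.append(i)
--     list_month.sort(reverse=True)
--     return list_month
-- ===== SOURCE B (Python) =====
-- def sorted_data(list_val):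
--     data = list_val[2::7]
--     years = [x[:4] for x in data]
--     pmax = []
--     m = None
--     for y in years:
--         m = y if m is None or y > m else m
--         pmax.append(m)
--     kept = [x for x, y, p in zip(data, years, pmax) if y == p]
--     return sorted(kept, reverse=True)
-- ===== Notes on version B (the rewrite author's own statement) =====
-- stated objective: faster
-- what changed: Replaces A's per-element membership test on a growing dedup list and full rescan of max(list_age) by a single-pass precomputed prefix-maximum table followed by a separate zip/filter pass and sorted(..., reverse=True).
import Mathlib
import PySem

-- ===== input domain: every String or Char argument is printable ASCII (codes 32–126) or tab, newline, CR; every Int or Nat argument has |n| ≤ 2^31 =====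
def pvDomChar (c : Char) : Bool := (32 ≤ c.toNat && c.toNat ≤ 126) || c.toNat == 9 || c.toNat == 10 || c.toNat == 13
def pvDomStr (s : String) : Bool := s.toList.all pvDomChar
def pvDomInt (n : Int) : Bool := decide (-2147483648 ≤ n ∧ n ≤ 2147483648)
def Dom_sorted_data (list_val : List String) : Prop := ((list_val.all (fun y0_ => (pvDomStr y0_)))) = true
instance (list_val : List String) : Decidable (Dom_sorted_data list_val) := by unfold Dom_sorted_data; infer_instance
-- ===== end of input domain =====

-- B replaces A's per-element rescan of max(list_age) (with its dedup side list) by a precomputed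
-- prefix-maximum table plus a separate zip/filter pass; objective: faster (no inner rescans).
-- A sorts list_month in place before returning it; only the return value is compared here.

-- ===== PORT A =====
def sorted_data (list_val : List String) : List String :=
  let list_of_data := (PySem.List.slice? list_val (some 2) none 7).getD []
  let st := list_of_data.foldl (fun (st : List String × List String) i =>
    let list_age := if PySem.Str.slice i none (some 4) ∈ st.1 then st.1
                    else st.1 ++ [PySem.Str.slice i none (some 4)]
    let max_age := (PySem.List.max? list_age (fun y => y)).getD ""
    let list_month := if PySem.Str.slice i none (some 4) == max_age then st.2 ++ [i] else st.2
    (list_age, list_month)) ([], [])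
  PySem.List.sorted st.2 (fun x => x) true

-- ===== PORT B =====
def sorted_data_alt (list_val : List String) : List String :=
  let data := (PySem.List.slice? list_val (some 2) none 7).getD []
  let years := data.map (fun x => PySem.Str.slice x none (some 4))
  let pmax := (years.foldl (fun (st : List String × Option String) y =>
      let m : String := match st.2 with
        | none => y
        | some m0 => if m0 < y then y else m0
      (st.1 ++ [m], some m)) ([], none)).1
  let kept := (data.zip (years.zip pmax)).filterMap
      (fun p => if p.2.1 == p.2.2 then some p.1 else none)
  PySem.List.sorted kept (fun x => x) true

-- ===== PRECONDITION & SPEC =====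
def Spec_sorted_data (list_val : List String) (out : List String) : Prop := out = sorted_data_alt list_val
instance (list_val : List String) (out : List String) : Decidable (Spec_sorted_data list_val out) := by unfold Spec_sorted_data; infer_instance

-- ===== CLAIM (what is proved, stated in full; the proofs are below) =====
def Claim_equal_sorted_data : Prop := ∀ (list_val : List String), Dom_sorted_data list_val → Spec_sorted_data list_val (sorted_data list_val)

-- ===== LEMMAS AND PROOFS =====

theorem pv_if_append (C : Prop) [Decidable C] (month K : List String) (i : String) :
    (if C then month ++ [i] else month) ++ K = month ++ ((if C then [i] else []) ++ K) := by
  split_ifs <;> simp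

/-- running-max step: `y if m is None or y > m else m`. -/
def pvStep (m : Option String) (y : String) : String :=
  match m with | none => y | some m0 => if m0 < y then y else m0

/-- reference: the elements kept by the running-max filter, given the max so far. -/
def pvKeep (m : Option String) : List String → List String
  | [] => []
  | i :: t =>
      let y := PySem.Str.slice i none (some 4)
      (if y == pvStep m y then [i] else []) ++ pvKeep (some (pvStep m y)) t

/-- reference: the prefix-maximum table of a list of years, given the max so far. -/
def pvPmax (m : Option String) : List String → List String
  | [] => []
  | y :: t => pvStep m y :: pvPmax (some (pvStep m y)) t

theorem pv_max_append (l : List String) (M y : String)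
    (h : PySem.List.max? l (fun z => z) = some M) :
    PySem.List.max? (l ++ [y]) (fun z => z) = some (if M < y then y else M) := by
  cases l with
  | nil => simp [PySem.List.max?] at h
  | cons x t =>
      rw [PySem.List.max?_id_cons] at h
      rw [List.cons_append, PySem.List.max?_id_cons, List.foldl_append]
      simp only [List.foldl]
      injection h with h
      rw [h]
      by_cases hlt : M < y
      · rw [if_pos hlt, max_eq_right (le_of_lt hlt)]
      · rw [if_neg hlt, max_eq_left (le_of_not_gt hlt)]

theorem pv_lemA (data : List String) :
    ∀ (ages month : List String) (M : String),
    PySem.List.max? ages (fun z => z) = some M →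
    (data.foldl (fun (st : List String × List String) i =>
      let list_age := if PySem.Str.slice i none (some 4) ∈ st.1 then st.1
                      else st.1 ++ [PySem.Str.slice i none (some 4)]
      let max_age := (PySem.List.max? list_age (fun y => y)).getD ""
      let list_month := if PySem.Str.slice i none (some 4) == max_age then st.2 ++ [i] else st.2
      (list_age, list_month)) (ages, month)).2 = month ++ pvKeep (some M) data := by
  induction data with
  | nil => intro ages month M h; simp [pvKeep]
  | cons i t ih =>
      intro ages month M h
      simp only [List.foldl]
      by_cases hmem : PySem.Str.slice i none (some 4) ∈ ages
      · have hle : PySem.Str.slice i none (some 4) ≤ M :=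
          PySem.List.max?_isMax h _ hmem
        have hnlt : ¬ M < PySem.Str.slice i none (some 4) := not_lt_of_ge hle
        simp only [hmem, if_true, h, Option.getD_some]
        rw [ih _ _ M h]
        conv_rhs => rw [pvKeep]
        simp only [pvStep, if_neg hnlt]
        exact pv_if_append _ _ _ _
      · have h' := pv_max_append ages M (PySem.Str.slice i none (some 4)) h
        simp only [hmem, if_false, h', Option.getD_some]
        rw [ih _ _ _ h']
        conv_rhs => rw [pvKeep]
        simp only [pvStep]
        exact pv_if_append _ _ _ _

theorem pv_lemA0 (data : List String) :
    (data.foldl (fun (st : List String × List String) i =>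
      let list_age := if PySem.Str.slice i none (some 4) ∈ st.1 then st.1
                      else st.1 ++ [PySem.Str.slice i none (some 4)]
      let max_age := (PySem.List.max? list_age (fun y => y)).getD ""
      let list_month := if PySem.Str.slice i none (some 4) == max_age then st.2 ++ [i] else st.2
      (list_age, list_month)) ([], [])).2 = pvKeep none data := by
  cases data with
  | nil => simp [pvKeep]
  | cons i t =>
      simp only [List.foldl, List.not_mem_nil, if_false, List.nil_append]
      have hmax : PySem.List.max? ([PySem.Str.slice i none (some 4)]) (fun z => z)
          = some (PySem.Str.slice i none (some 4)) := by
        rw [PySem.List.max?_id_cons]; simp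
      simp only [hmax, Option.getD_some, beq_self_eq_true, if_true]
      rw [pv_lemA t _ _ _ hmax]
      simp [pvKeep, pvStep]

theorem pv_lemB1 (ys : List String) :
    ∀ (acc : List String) (m : Option String),
    (ys.foldl (fun (st : List String × Option String) y =>
      let m : String := match st.2 with
        | none => y
        | some m0 => if m0 < y then y else m0
      (st.1 ++ [m], some m)) (acc, m)).1 = acc ++ pvPmax m ys := by
  induction ys with
  | nil => intro acc m; simp [pvPmax]
  | cons y t ih =>
      intro acc m
      simp only [List.foldl]
      rw [ih]
      simp [pvPmax, pvStep]

theorem pv_lemB2 (data : List String) :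
    ∀ (m : Option String),
    ((data.zip (((data.map (fun x => PySem.Str.slice x none (some 4)))).zip
        (pvPmax m (data.map (fun x => PySem.Str.slice x none (some 4)))))).filterMap
      (fun p => if p.2.1 == p.2.2 then some p.1 else none)) = pvKeep m data := by
  induction data with
  | nil => intro m; simp [pvKeep]
  | cons i t ih =>
      intro m
      simp only [List.map, pvPmax, List.zip_cons_cons, List.filterMap_cons]
      by_cases he : PySem.Str.slice i none (some 4) == pvStep m (PySem.Str.slice i none (some 4))
      · simp only [he, if_true, pvKeep]
        rw [ih]
        simp
      · simp only [he, pvKeep]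
        rw [ih]
        simp

-- ===== VERDICT (by name: the statement is the Claim_ definition above) =====
theorem sorted_data_spec : Claim_equal_sorted_data := by
  intro list_val _
  unfold Spec_sorted_data sorted_data sorted_data_alt
  simp only []
  generalize (PySem.List.slice? list_val (some 2) none 7).getD [] = data
  rw [pv_lemA0, pv_lemB1, List.nil_append, pv_lemB2]
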